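-- pv_equiv track=rewrite | github.com/minkaas/AdventOfCode_2 | 2024/Day19/Day19.py | part2
-- ===== SOURCE A (Python) =====
-- def starts_with_token(line, tokens):
--     result = []
--     for token in tokens:
--         if len(token) <= len(line):
--             if token == line[:len(token)]:
--                 result.append(token)
--     return result
--
-- def rgbw_lexer_2(data, tokens, computed):
--     result = 0
--     possibles = starts_with_token(data, tokens)
--     if data in computed:
--         return computed[data]
--     if data == '':
--         return 1
--     if len(possibles) == 0:
--         return 0
--     elif len(possibles) == 1:
--         to_check = data[len(possibles[0]):]
--         if to_check in computed:
--             return computed[to_check]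
--         return rgbw_lexer_2(to_check, tokens, computed)
--     else:
--         i = 0
--         while i < len(possibles):
--             to_check = data[len(possibles[i]):]
--             if to_check in computed:
--                 result += computed[to_check]
--             else:
--                 temp = rgbw_lexer_2(to_check, tokens, computed)
--                 computed[to_check] = temp
--                 result += temp
--             i += 1
--         return result
--
-- def part2(data, tokens, impossibles):
--     result = 0
--     i = 0
--     for dat in data:
--         if i not in impossibles:
--             result += rgbw_lexer_2(dat, tokens, {})
--         i += 1
--     return result
-- ===== SOURCE B (Python) =====
-- def count_ways(s, tokens):
--     cnt = {}
--     lens = set()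
--     for t in tokens:
--         cnt[t] = cnt.get(t, 0) + 1
--         if len(t) >= 1:
--             lens.add(len(t))
--     n = len(s)
--     dp = [0] * (n + 1)
--     dp[n] = 1
--     for i in range(n - 1, -1, -1):
--         acc = 0
--         for L in lens:
--             if L <= n - i:
--                 acc += cnt.get(s[i:i+L], 0) * dp[i + L]
--         dp[i] = acc
--     return dp[0]
--
-- def part2(data, tokens, impossibles):
--     banned = set(impossibles)
--     total = 0
--     for i, dat in enumerate(data):
--         if i not in banned:
--             total += count_ways(dat, tokens)
--     return total
-- ===== Notes on version B (the rewrite author's own statement) =====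
-- stated objective: faster
-- what changed: Top-down memoized recursion with per-call prefix scans over all tokens is replaced by a bottom-up DP over suffix positions that looks each candidate slice up in a token multiset (dict of counts) keyed by the distinct token lengths, so the per-position work drops from all T tokens to the distinct lengths.
import Mathlib
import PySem

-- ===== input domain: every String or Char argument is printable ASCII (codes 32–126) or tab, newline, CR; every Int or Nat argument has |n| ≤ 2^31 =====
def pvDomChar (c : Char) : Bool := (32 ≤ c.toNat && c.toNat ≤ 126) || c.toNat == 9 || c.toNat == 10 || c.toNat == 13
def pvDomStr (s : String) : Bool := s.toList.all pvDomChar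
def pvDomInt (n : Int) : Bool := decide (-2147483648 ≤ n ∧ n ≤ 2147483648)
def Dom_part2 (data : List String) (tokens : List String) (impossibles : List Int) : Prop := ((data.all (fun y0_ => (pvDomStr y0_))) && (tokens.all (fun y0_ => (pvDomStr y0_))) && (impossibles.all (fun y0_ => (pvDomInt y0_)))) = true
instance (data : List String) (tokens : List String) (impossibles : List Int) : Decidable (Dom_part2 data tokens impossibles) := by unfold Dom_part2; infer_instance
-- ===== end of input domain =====

-- B replaces A's memoized top-down recursion (which scans ALL tokens at every suffix) by a
-- bottom-up DP over suffix positions that looks slices up in a token-count dict keyed by the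
-- distinct token lengths; equivalence of the RETURN value is proved on Pre_part2.

-- ===== PORT A =====
-- starts_with_token(line, tokens)
def startsWithToken (line : String) (tokens : List String) : List String :=
  tokens.foldl (fun result token =>
    if PySem.Str.len token ≤ PySem.Str.len line then
      if token = PySem.Str.slice line none (some (PySem.Str.len token)) then result ++ [token]
      else result
    else result) []

-- rgbw_lexer_2(data, tokens, computed); the result pairs the return value with the mutated memo
-- dict. Python has no fuel: part2 calls it with fuel = len(data)+1, which is enough whenever no
-- empty token can be matched (Pre_part2); on an empty token Python recurses forever.
def rgbw (tokens : List String) : Nat → String → PySem.Dict String Int → Int × PySem.Dict String Int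
  | 0, _, computed => (0, computed)
  | fuel+1, data, computed =>
    let possibles := startsWithToken data tokens
    match computed.get? data with
    | some v => (v, computed)
    | none =>
      if data = "" then (1, computed)
      else if possibles.length = 0 then (0, computed)
      else if possibles.length = 1 then
        let toCheck := PySem.Str.slice data (some (PySem.Str.len (PySem.List.pyGetD possibles 0 ""))) none
        match computed.get? toCheck with
        | some v => (v, computed)
        | none => rgbw tokens fuel toCheck computed
      else
        possibles.foldl (fun st p =>
          let toCheck := PySem.Str.slice data (some (PySem.Str.len p)) none
          match st.2.get? toCheck with
          | some v => (st.1 + v, st.2)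
          | none =>
            let r := rgbw tokens fuel toCheck st.2
            (st.1 + r.1, r.2.insert toCheck r.1)) ((0:Int), computed)

def part2 (data : List String) (tokens : List String) (impossibles : List Int) : Int :=
  (data.foldl (fun (st : Int × Int) dat =>
      ((if st.2 ∈ impossibles then st.1
        else st.1 + (rgbw tokens (dat.toList.length + 1) dat PySem.Dict.empty).1), st.2 + 1))
    ((0:Int), (0:Int))).1

-- ===== PORT B =====
-- body of Source B's 'for i in range(n-1, -1, -1)' loop: dp[i] = sum over distinct lengths
def cwRow (cnt : PySem.Dict String Int) (lens : PySem.Set Int) (s : String) (n : Nat)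
    (dp : List Int) (i : Int) : List Int :=
  let acc := lens.foldl (fun acc L =>
      if L ≤ (n:Int) - i then
        acc + cnt.getD (PySem.Str.slice s (some i) (some (i + L))) 0 * PySem.List.pyGetD dp (i + L) 0
      else acc) (0:Int)
  PySem.List.pySetD dp i acc

-- count_ways(s, tokens)
def countWays (s : String) (tokens : List String) : Int :=
  let cl := tokens.foldl (fun (cl : PySem.Dict String Int × PySem.Set Int) t =>
      (cl.1.insert t (cl.1.getD t 0 + 1),
       if 1 ≤ PySem.Str.len t then PySem.Set.add cl.2 (PySem.Str.len t) else cl.2))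
    (PySem.Dict.empty, PySem.Set.empty)
  let n := s.toList.length
  let dp := (PySem.List.pyRange ((n:Int) - 1) (-1) (-1)).foldl (cwRow cl.1 cl.2 s n)
      ((List.replicate (n+1) (0:Int)).set n 1)
  PySem.List.pyGetD dp 0 0

def part2_alt (data : List String) (tokens : List String) (impossibles : List Int) : Int :=
  let banned := PySem.Set.ofList impossibles
  (PySem.List.enumerate data 0).foldl (fun total p =>
      if PySem.Set.contains banned p.1 then total else total + countWays p.2 tokens) 0

-- ===== PRECONDITION & SPEC =====
-- Pre_ excludes exactly the inputs on which A recurses forever (RecursionError): an empty string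
-- among tokens while some string counted (index not in impossibles) is non-empty.
def Pre_part2 (data : List String) (tokens : List String) (impossibles : List Int) : Prop :=
  "" ∉ tokens ∨ ∀ p ∈ PySem.List.enumerate data 0, p.1 ∉ impossibles → p.2 = ""
instance (data : List String) (tokens : List String) (impossibles : List Int) : Decidable (Pre_part2 data tokens impossibles) := by unfold Pre_part2; infer_instance

def pvWitness_part2 : List String × List String × List Int :=
  (["brwrr", "bggr", "ubwu"], ["r", "wr", "b", "g", "bwu", "rb", "gb", "br"], [2])

def Spec_part2 (data : List String) (tokens : List String) (impossibles : List Int) (out : Int) : Prop := out = part2_alt data tokens impossibles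
instance (data : List String) (tokens : List String) (impossibles : List Int) (out : Int) : Decidable (Spec_part2 data tokens impossibles out) := by unfold Spec_part2; infer_instance

-- ===== CLAIM (what is proved, stated in full; the proofs are below) =====
def Claim_equal_part2 : Prop := ∀ (data : List String) (tokens : List String) (impossibles : List Int), Dom_part2 data tokens impossibles → Pre_part2 data tokens impossibles → Spec_part2 data tokens impossibles (part2 data tokens impossibles)

-- ===== LEMMAS AND PROOFS =====

-- number of tilings of s by tokens (fuel-indexed spec; Wc is the canonical fuel)
def W (tokens : List String) : Nat → List Char → Int
  | 0, _ => 0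
  | f+1, s => if s = [] then 1
      else (tokens.map (fun t => if t.toList <+: s then W tokens f (s.drop t.toList.length) else 0)).sum

def Wc (tokens : List String) (s : List Char) : Int := W tokens (s.length + 1) s

-- memo-dict invariant of A: every stored value is the tiling count of its key
def MemoInv (tokens : List String) (c : PySem.Dict String Int) : Prop :=
  ∀ k v, c.get? k = some v → v = Wc tokens k.toList

lemma prefix_char (line token : String) :
    (PySem.Str.len token ≤ PySem.Str.len line ∧ token = PySem.Str.slice line none (some (PySem.Str.len token)))
    ↔ token.toList <+: line.toList := by
  have hsl : (PySem.Str.slice line none (some (PySem.Str.len token))).toList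
      = line.toList.take token.toList.length := by
    simp [PySem.Str.len_eq]
  have heq : token = PySem.Str.slice line none (some (PySem.Str.len token))
      ↔ token.toList = line.toList.take token.toList.length := by
    rw [← hsl, String.toList_inj]
  have hlen : (PySem.Str.len token ≤ PySem.Str.len line) ↔ token.toList.length ≤ line.toList.length := by
    simp [PySem.Str.len_eq]
  rw [heq, hlen, List.prefix_iff_eq_take]
  constructor
  · rintro ⟨_, h2⟩; exact h2
  · intro h
    exact ⟨by rw [h]; simpa using List.length_take_le _ _, h⟩


lemma swt_eq (line : String) (tokens : List String) :
    startsWithToken line tokens = tokens.filter (fun t => decide (t.toList <+: line.toList)) := by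
  rw [startsWithToken]
  rw [PySem.List.foldl_congr_mem' (g := fun result token =>
    if (PySem.Str.len token ≤ PySem.Str.len line ∧ token = PySem.Str.slice line none (some (PySem.Str.len token))) then result ++ [token] else result)]
  · rw [PySem.List.foldl_append_ite_eq_filter]
    simp only [List.nil_append]
    apply List.filter_congr
    intro t _
    rw [decide_eq_decide]
    exact prefix_char line t
  · intro x _ acc
    split_ifs <;> first | rfl | tauto

lemma sliceFrom_toList (s p : String) :
    (PySem.Str.slice s (some (PySem.Str.len p)) none).toList = s.toList.drop p.toList.length := by
  simp [PySem.Str.len_eq]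

lemma tok_len_pos (t : String) (h : t ≠ "") : 0 < t.toList.length := by
  rcases Nat.eq_zero_or_pos t.toList.length with h0 | h1
  · exact absurd (String.toList_inj.mp (by simpa using List.eq_nil_of_length_eq_zero h0)) h
  · exact h1

lemma drop_lt {s : List Char} {t : String} (hp : t.toList <+: s) (hs : s ≠ [])
    (ht : t ≠ "") : (s.drop t.toList.length).length < s.length := by
  have := tok_len_pos t ht
  have hle := hp.length_le
  simp only [List.length_drop]
  omega

lemma W_stab (tokens : List String) (HT : ∀ t ∈ tokens, t ≠ "") :
    ∀ f (s : List Char), s.length < f → W tokens f s = Wc tokens s := by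
  intro f
  induction f using Nat.strong_induction_on with
  | _ f IH =>
    intro s hf
    match f, hf with
    | f+1, hf =>
      by_cases hs : s = []
      · subst hs; simp [Wc, W]
      · show W tokens (f+1) s = W tokens (s.length+1) s
        rw [W, W, if_neg hs, if_neg hs]
        congr 1
        apply List.map_congr_left
        intro t ht
        by_cases hp : t.toList <+: s
        · rw [if_pos hp, if_pos hp]
          have hlt := drop_lt hp hs (HT t ht)
          rw [IH f (by omega) _ (by omega), IH s.length (by omega) _ (by omega)]
        · rw [if_neg hp, if_neg hp]

lemma Wc_nil (tokens : List String) : Wc tokens [] = 1 := by simp [Wc, W]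

lemma Wc_sum (tokens : List String) (HT : ∀ t ∈ tokens, t ≠ "") (s : List Char) (hs : s ≠ []) :
    Wc tokens s
      = (tokens.map (fun t => if t.toList <+: s then Wc tokens (s.drop t.toList.length) else 0)).sum := by
  rw [Wc, W, if_neg hs]
  congr 1
  apply List.map_congr_left
  intro t ht
  by_cases hp : t.toList <+: s
  · rw [if_pos hp, if_pos hp, W_stab tokens HT s.length _ (drop_lt hp hs (HT t ht))]
  · rw [if_neg hp, if_neg hp]

lemma sum_if_filter {α : Type} (l : List α) (p : α → Prop) [DecidablePred p] (g : α → Int) :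
    (l.map (fun t => if p t then g t else 0)).sum = ((l.filter (fun t => decide (p t))).map g).sum := by
  induction l with
  | nil => simp
  | cons x xs ih => by_cases h : p x <;> simp [h, ih]

lemma sum_if_count {α : Type} [DecidableEq α] (l : List α) (v : α) (c : Int) :
    (l.map (fun t => if t = v then c else 0)).sum = (l.count v : Int) * c := by
  induction l with
  | nil => simp
  | cons x xs ih =>
    by_cases h : x = v
    · subst h; simp [ih, List.count_cons_self]; push_cast; ring
    · simp [h, ih, List.count_cons_of_ne h]

lemma group_sum {α κ : Type} [DecidableEq κ] (key : α → κ) (g : α → Int) :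
    ∀ (ks : List κ) (l : List α), ks.Nodup → (∀ t ∈ l, key t ∈ ks) →
      (ks.map (fun L => ((l.filter (fun t => decide (key t = L))).map g).sum)).sum = (l.map g).sum := by
  intro ks
  induction ks with
  | nil =>
    intro l _ hcov
    have : l = [] := List.eq_nil_iff_forall_not_mem.mpr (fun x hx => by simpa using hcov x hx)
    subst this; simp
  | cons L ks ih =>
    intro l hnd hcov
    have hLnotin : L ∉ ks := by simp at hnd; exact hnd.1
    have hnd' : ks.Nodup := by simp at hnd; exact hnd.2
    set l' := l.filter (fun t => !decide (key t = L)) with hl'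
    have hcov' : ∀ t ∈ l', key t ∈ ks := by
      intro t ht
      rw [hl', List.mem_filter] at ht
      rcases List.mem_cons.mp (hcov t ht.1) with h | h
      · exact absurd h (by simpa using ht.2)
      · exact h
    rw [List.map_cons, List.sum_cons]
    have hks : (ks.map (fun L' => ((l.filter (fun t => decide (key t = L'))).map g).sum))
             = (ks.map (fun L' => ((l'.filter (fun t => decide (key t = L'))).map g).sum)) := by
      apply List.map_congr_left
      intro L' hL'
      have hfe : l'.filter (fun t => decide (key t = L')) = l.filter (fun t => decide (key t = L')) := by
        rw [hl', List.filter_filter]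
        apply List.filter_congr
        intro t _
        by_cases h : key t = L'
        · simp [h]
          exact fun hh => hLnotin (hh ▸ hL')
        · simp [h]
      rw [hfe]
    rw [hks, ih l' hnd' hcov']
    have hsplit : ((l.filter (fun t => decide (key t = L))).map g).sum + (l'.map g).sum
        = ((l.filter (fun t => decide (key t = L)) ++ l').map g).sum := by simp
    rw [hsplit, ((List.filter_append_perm (fun t => decide (key t = L)) l).map g).sum_eq]

lemma toList_ne_nil {s : String} (h : s ≠ "") : s.toList ≠ [] :=
  fun hh => h (String.toList_inj.mp (by simpa using hh))

lemma memoInv_insert (tokens : List String) (c : PySem.Dict String Int) (k : String)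
    (hc : MemoInv tokens c) (hv : MemoInv tokens c → True) (v : Int) (hval : v = Wc tokens k.toList) :
    MemoInv tokens (c.insert k v) := by
  intro k' v' h
  by_cases hk : k' = k
  · subst hk
    rw [PySem.Dict.get?_insert_self] at h
    cases h; exact hval
  · rw [PySem.Dict.get?_insert_of_ne c v hk] at h
    exact hc k' v' h

lemma rgbw_loop (tokens : List String) (f : Nat) (s : String)
    (hf : s.toList.length ≤ f)
    (IH : ∀ (s' : String) c, s'.toList.length < f → MemoInv tokens c →
        (rgbw tokens f s' c).1 = Wc tokens s'.toList ∧ MemoInv tokens (rgbw tokens f s' c).2)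
    (hs : s ≠ "") (HT : ∀ t ∈ tokens, t ≠ "") :
    ∀ (ps : List String) (acc : Int) (cc : PySem.Dict String Int),
      (∀ p ∈ ps, p ∈ tokens ∧ p.toList <+: s.toList) → MemoInv tokens cc →
      ((ps.foldl (fun st p =>
          let toCheck := PySem.Str.slice s (some (PySem.Str.len p)) none
          match st.2.get? toCheck with
          | some v => (st.1 + v, st.2)
          | none =>
            let r := rgbw tokens f toCheck st.2
            (st.1 + r.1, r.2.insert toCheck r.1)) (acc, cc)).1
        = acc + (ps.map (fun p => Wc tokens (s.toList.drop p.toList.length))).sum)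
      ∧ MemoInv tokens ((ps.foldl (fun st p =>
          let toCheck := PySem.Str.slice s (some (PySem.Str.len p)) none
          match st.2.get? toCheck with
          | some v => (st.1 + v, st.2)
          | none =>
            let r := rgbw tokens f toCheck st.2
            (st.1 + r.1, r.2.insert toCheck r.1)) (acc, cc)).2) := by
  intro ps
  induction ps with
  | nil => intro acc cc _ hcc; simpa using hcc
  | cons p ps ihp =>
    intro acc cc hmem hcc
    obtain ⟨hptok, hppre⟩ := hmem p (List.mem_cons_self ..)
    have hdlt : (s.toList.drop p.toList.length).length < s.toList.length :=
      drop_lt hppre (toList_ne_nil hs) (HT p hptok)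
    simp only [List.foldl_cons]
    cases hget : cc.get? (PySem.Str.slice s (some (PySem.Str.len p)) none) with
    | some v =>
      simp only [hget]
      have hv : v = Wc tokens (s.toList.drop p.toList.length) := by
        have := hcc _ _ hget
        rwa [sliceFrom_toList] at this
      have := ihp (acc + v) cc (fun q hq => hmem q (List.mem_cons_of_mem _ hq)) hcc
      rw [this.1]
      refine ⟨by rw [hv]; simp; ring, this.2⟩
    | none =>
      simp only [hget]
      have hrec := IH (PySem.Str.slice s (some (PySem.Str.len p)) none) cc
        (by rw [sliceFrom_toList]; omega) hcc
      have hval : (rgbw tokens f (PySem.Str.slice s (some (PySem.Str.len p)) none) cc).1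
          = Wc tokens (s.toList.drop p.toList.length) := by
        rw [hrec.1, sliceFrom_toList]
      have hinv2 : MemoInv tokens
          ((rgbw tokens f (PySem.Str.slice s (some (PySem.Str.len p)) none) cc).2.insert
            (PySem.Str.slice s (some (PySem.Str.len p)) none)
            (rgbw tokens f (PySem.Str.slice s (some (PySem.Str.len p)) none) cc).1) := by
        apply memoInv_insert tokens _ _ hrec.2 (fun _ => trivial)
        rw [hval, sliceFrom_toList]
      have := ihp (acc + (rgbw tokens f (PySem.Str.slice s (some (PySem.Str.len p)) none) cc).1)
        _ (fun q hq => hmem q (List.mem_cons_of_mem _ hq)) hinv2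
      rw [this.1]
      refine ⟨by rw [hval]; simp; ring, this.2⟩

lemma rgbw_correct (tokens : List String) (HT : ∀ t ∈ tokens, t ≠ "") :
    ∀ f (s : String) c, s.toList.length < f → MemoInv tokens c →
      (rgbw tokens f s c).1 = Wc tokens s.toList ∧ MemoInv tokens (rgbw tokens f s c).2 := by
  intro f
  induction f using Nat.strong_induction_on with
  | _ f IHf =>
    intro s c hf hc
    match f, hf with
    | f+1, hf =>
      have IH : ∀ (s' : String) c, s'.toList.length < f → MemoInv tokens c →
          (rgbw tokens f s' c).1 = Wc tokens s'.toList ∧ MemoInv tokens (rgbw tokens f s' c).2 :=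
        fun s' c h hc => IHf f (by omega) s' c h hc
      rw [rgbw]
      cases hget : c.get? s with
      | some v =>
        simp only [hget]
        exact ⟨hc s v hget, hc⟩
      | none =>
        simp only [hget]
        by_cases hs : s = ""
        · subst hs
          simp only [if_pos rfl]
          constructor
          · show (1:Int) = Wc tokens "".toList
            rw [show "".toList = ([] : List Char) from rfl, Wc_nil]
          · exact hc
        · rw [if_neg hs]
          have hsl : s.toList ≠ [] := toList_ne_nil hs
          have hposs : ∀ p ∈ startsWithToken s tokens, p ∈ tokens ∧ p.toList <+: s.toList := by
            intro p hp
            rw [swt_eq] at hp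
            rw [List.mem_filter] at hp
            exact ⟨hp.1, by simpa using hp.2⟩
          have hWs : Wc tokens s.toList
              = ((startsWithToken s tokens).map (fun p => Wc tokens (s.toList.drop p.toList.length))).sum := by
            rw [Wc_sum tokens HT s.toList hsl, swt_eq,
              sum_if_filter tokens (fun t => t.toList <+: s.toList) (fun t => Wc tokens (s.toList.drop t.toList.length))]
          by_cases h0 : (startsWithToken s tokens).length = 0
          · rw [if_pos h0]
            rw [List.length_eq_zero_iff] at h0
            rw [h0] at hWs
            simp at hWs
            exact ⟨hWs.symm, hc⟩
          · rw [if_neg h0]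
            by_cases h1 : (startsWithToken s tokens).length = 1
            · rw [if_pos h1]
              obtain ⟨p, hp⟩ := List.length_eq_one_iff.mp h1
              rw [hp]
              rw [hp] at hWs
              simp only [List.map_cons, List.map_nil, List.sum_cons, List.sum_nil, add_zero] at hWs
              have hpp := hposs p (by rw [hp]; exact List.mem_cons_self ..)
              have hdlt : (s.toList.drop p.toList.length).length < s.toList.length :=
                drop_lt hpp.2 hsl (HT p hpp.1)
              rw [show PySem.List.pyGetD [p] 0 "" = p from rfl]
              cases hget2 : c.get? (PySem.Str.slice s (some (PySem.Str.len p)) none) with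
              | some v =>
                simp only [hget2]
                have := hc _ _ hget2
                rw [sliceFrom_toList] at this
                exact ⟨by rw [this, hWs], hc⟩
              | none =>
                simp only [hget2]
                have hrec := IH (PySem.Str.slice s (some (PySem.Str.len p)) none) c
                  (by rw [sliceFrom_toList]; omega) hc
                refine ⟨?_, hrec.2⟩
                rw [hrec.1, sliceFrom_toList, hWs]
            · rw [if_neg h1]
              have := rgbw_loop tokens f s (by omega) IH hs HT (startsWithToken s tokens) 0 c hposs hc
              rw [hWs]
              exact ⟨by rw [this.1]; ring, this.2⟩

lemma lens_eq (tokens : List String) (HT : ∀ t ∈ tokens, t ≠ "") :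
    tokens.foldl (fun se t => if 1 ≤ PySem.Str.len t then PySem.Set.add se (PySem.Str.len t) else se) PySem.Set.empty
      = PySem.Set.ofList (tokens.map (fun t => PySem.Str.len t)) := by
  rw [PySem.List.foldl_ite_eq_foldl_filter (p := fun t => 1 ≤ PySem.Str.len t)]
  have hfe : tokens.filter (fun t => decide (1 ≤ PySem.Str.len t)) = tokens := by
    apply List.filter_eq_self.mpr
    intro t ht
    have := tok_len_pos t (HT t ht)
    have hl2 : t.toList.length = t.length := String.length_toList
    simp only [decide_eq_true_eq, PySem.Str.len_eq]
    omega
  rw [hfe, ← PySem.Set.update_map_eq_foldl_add, PySem.Set.update_empty]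

-- the inner sum over distinct lengths computes Wc of the suffix at position k
lemma acc_eq (tokens : List String) (HT : ∀ t ∈ tokens, t ≠ "") (s : String) (k : Nat)
    (dp : List Int) (hk : k < s.toList.length)
    (hdp : ∀ j : Nat, k + 1 ≤ j → j ≤ s.toList.length → dp.getD j 0 = Wc tokens (s.toList.drop j)) :
    (PySem.Set.ofList (tokens.map (fun t => PySem.Str.len t))).foldl (fun acc L =>
        if L ≤ (s.toList.length : Int) - (k:Int) then
          acc + (PySem.Dict.counter tokens).getD
              (PySem.Str.slice s (some (k:Int)) (some ((k:Int) + L))) 0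
            * PySem.List.pyGetD dp ((k:Int) + L) 0
        else acc) (0:Int)
      = Wc tokens (s.toList.drop k) := by
  set cs := s.toList with hcs
  set n := cs.length with hn
  set lens := PySem.Set.ofList (tokens.map (fun t => PySem.Str.len t)) with hlens
  set g : Int → Int := fun L =>
    (PySem.Dict.counter tokens).getD (PySem.Str.slice s (some (k:Int)) (some ((k:Int) + L))) 0
      * PySem.List.pyGetD dp ((k:Int) + L) 0 with hg
  rw [PySem.List.foldl_ite_eq_foldl_filter (p := fun L => L ≤ (n:Int) - (k:Int))]
  rw [PySem.List.foldl_add _ g 0, zero_add]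
  rw [← sum_if_filter lens (fun L => L ≤ (n:Int) - (k:Int)) g]
  have hdropne : cs.drop k ≠ [] := by
    intro h
    have := List.drop_eq_nil_iff.mp h
    omega
  rw [Wc_sum tokens HT (cs.drop k) hdropne]
  rw [← group_sum (fun t => PySem.Str.len t)
      (fun t => if t.toList <+: cs.drop k then Wc tokens ((cs.drop k).drop t.toList.length) else 0)
      lens tokens (by rw [hlens]; exact PySem.Set.nodup_ofList _)
      (by intro t ht; rw [hlens, PySem.Set.mem_ofList]; exact List.mem_map_of_mem ht)]
  congr 1
  apply List.map_congr_left
  intro L hL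
  have hLtok : ∃ t0 ∈ tokens, PySem.Str.len t0 = L := by
    rw [hlens, PySem.Set.mem_ofList] at hL
    simpa using hL
  obtain ⟨t0, ht0, hLt0⟩ := hLtok
  have hLn : L = (t0.toList.length : Int) := by
    rw [← hLt0]; simp [PySem.Str.len_eq]
  have hLnpos : 1 ≤ t0.toList.length := tok_len_pos t0 (HT t0 ht0)
  set Ln := t0.toList.length with hLndef
  by_cases hle : L ≤ (n:Int) - (k:Int)
  · -- the interesting case: a slice of length Ln fits
    have hLnle : k + Ln ≤ n := by rw [hLn] at hle; omega
    set S := PySem.Str.slice s (some (k:Int)) (some ((k:Int) + L)) with hS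
    have hslice : S.toList = (cs.drop k).take Ln := by
      rw [hS, hLn]
      have h1 : (PySem.Str.slice s (some (k:Int)) (some ((k:Int) + (Ln:Int)))).toList
          = PySem.List.slice cs (some (k:Int)) (some ((k:Int) + (Ln:Int))) := by simp [← hcs]
      rw [h1, PySem.List.slice_natCast_add]
    have hSlen : S.toList.length = Ln := by
      rw [hslice, List.length_take, List.length_drop]; omega
    have hdpv : PySem.List.pyGetD dp ((k:Int) + L) 0 = Wc tokens (cs.drop (k + Ln)) := by
      rw [hLn, show ((k:Int) + (Ln:Int)) = ((k + Ln : Nat) : Int) by push_cast; ring,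
        PySem.List.pyGetD_natCast]
      exact hdp (k+Ln) (by omega) hLnle
    have hG : ∀ t ∈ tokens.filter (fun t => decide (PySem.Str.len t = L)),
        (if t.toList <+: cs.drop k then Wc tokens ((cs.drop k).drop t.toList.length) else 0)
        = (if t = S then Wc tokens (cs.drop (k + Ln)) else 0) := by
      intro t ht
      rw [List.mem_filter] at ht
      have hlt : t.toList.length = Ln := by
        have h2 := ht.2
        simp only [decide_eq_true_eq, PySem.Str.len_eq, ← String.length_toList] at h2
        rw [hLn] at h2
        exact_mod_cast h2
      have hiff : (t.toList <+: cs.drop k) ↔ t = S := by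
        rw [List.prefix_iff_eq_take, hlt, ← hslice]
        exact String.toList_inj
      by_cases hp : t.toList <+: cs.drop k
      · rw [if_pos hp, if_pos (hiff.mp hp), hlt, List.drop_drop, Nat.add_comm]
      · rw [if_neg hp, if_neg (fun h => hp (hiff.mpr h))]
    have hcnt : (tokens.filter (fun t => decide (PySem.Str.len t = L))).count S = tokens.count S := by
      apply List.count_filter
      have hl2 : S.toList.length = S.length := String.length_toList
      simp only [decide_eq_true_eq, PySem.Str.len_eq, hLn]
      omega
    rw [List.map_congr_left hG, sum_if_count, if_pos hle, hcnt]
    show (PySem.Dict.counter tokens).getD S 0 * PySem.List.pyGetD dp ((k:Int) + L) 0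
        = (tokens.count S : Int) * Wc tokens (cs.drop (k + Ln))
    rw [PySem.Dict.getD_counter, hdpv]
  · -- slice does not fit: both sides are 0
    rw [if_neg hle]
    symm
    rw [List.sum_eq_zero]
    intro x hx
    rw [List.mem_map] at hx
    obtain ⟨t, ht, hxv⟩ := hx
    rw [List.mem_filter] at ht
    have hlen : t.toList.length = Ln := by
      have := ht.2
      simp only [decide_eq_true_eq] at this
      rw [hLn] at this
      exact_mod_cast (by simpa [PySem.Str.len_eq] using this)
    rw [← hxv, if_neg]
    intro hpre
    have := hpre.length_le
    rw [hlen] at this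
    simp only [List.length_drop] at this
    omega

lemma dp_loop (tokens : List String) (HT : ∀ t ∈ tokens, t ≠ "") (s : String) :
    ∀ (k : Nat) (dp : List Int), k ≤ s.toList.length → dp.length = s.toList.length + 1 →
      (∀ j : Nat, k ≤ j → j ≤ s.toList.length → dp.getD j 0 = Wc tokens (s.toList.drop j)) →
      ∀ j : Nat, j ≤ s.toList.length →
        ((PySem.List.pyRange ((k:Int) - 1) (-1) (-1)).foldl
          (cwRow (PySem.Dict.counter tokens)
            (PySem.Set.ofList (tokens.map (fun t => PySem.Str.len t))) s s.toList.length)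
          dp).getD j 0 = Wc tokens (s.toList.drop j) := by
  intro k
  induction k with
  | zero =>
    intro dp _ _ hdp j hj
    rw [show ((0:Nat):Int) - 1 = -1 by norm_num, PySem.List.pyRange_neg_one_eq_nil (by norm_num)]
    exact hdp j (Nat.zero_le _) hj
  | succ k ihk =>
    intro dp hk hlen hdp j hj
    rw [show (((k+1:Nat)):Int) - 1 = (k:Int) by push_cast; ring,
      PySem.List.pyRange_neg_one_cons (by omega), List.foldl_cons]
    have hacc : cwRow (PySem.Dict.counter tokens)
        (PySem.Set.ofList (tokens.map (fun t => PySem.Str.len t))) s s.toList.length dp (k:Int)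
        = dp.set k (Wc tokens (s.toList.drop k)) := by
      rw [cwRow]
      rw [acc_eq tokens HT s k dp (by omega) (fun j h1 h2 => hdp j (by omega) h2)]
      rw [PySem.List.pySetD_natCast]
    rw [show ((k:Int)) - 1 = ((k:Nat):Int) - 1 from rfl, hacc]
    apply ihk
    · omega
    · simpa using hlen
    · intro j' hj1 hj2
      by_cases hjk : j' = k
      · subst hjk
        rw [List.getD_eq_getElem?_getD, List.getElem?_set_self (by omega)]
        rfl
      · rw [List.getD_eq_getElem?_getD, List.getElem?_set_ne (by omega)]
        rw [← List.getD_eq_getElem?_getD]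
        exact hdp j' (by omega) hj2
    · exact hj

lemma countWays_eq (tokens : List String) (HT : ∀ t ∈ tokens, t ≠ "") (s : String) :
    countWays s tokens = Wc tokens s.toList := by
  rw [countWays]
  rw [PySem.List.foldl_prod_mk (f := fun d t => PySem.Dict.insert d t (d.getD t 0 + 1))
    (g := fun se t => if 1 ≤ PySem.Str.len t then PySem.Set.add se (PySem.Str.len t) else se)]
  simp only [PySem.Dict.foldl_insert_getD_add_one_eq_counter, lens_eq tokens HT]
  have hlen0 : ((List.replicate (s.toList.length+1) (0:Int)).set s.toList.length 1).length
      = s.toList.length + 1 := by simp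
  have hdp0 : ∀ j : Nat, s.toList.length ≤ j → j ≤ s.toList.length →
      ((List.replicate (s.toList.length+1) (0:Int)).set s.toList.length 1).getD j 0
        = Wc tokens (s.toList.drop j) := by
    intro j h1 h2
    have : j = s.toList.length := by omega
    subst this
    rw [List.getD_eq_getElem?_getD, List.getElem?_set_self (by simp)]
    rw [List.drop_length, Wc_nil]
    rfl
  have h2 := dp_loop tokens HT s s.toList.length _ (le_refl _) hlen0 hdp0 0 (Nat.zero_le _)
  rw [List.drop_zero] at h2
  rw [PySem.List.pyGetD_zero]
  exact h2

lemma rgbw_empty (tokens : List String) :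
    (rgbw tokens ("".toList.length + 1) "" PySem.Dict.empty).1 = 1 := by
  rw [show ("".toList.length + 1) = 1 from rfl, rgbw]
  simp [PySem.Dict.get?_empty]

lemma countWays_empty (tokens : List String) : countWays "" tokens = 1 := rfl

lemma fold_eq (tokens : List String) (impossibles : List Int) :
    ∀ (l : List String) (i acc : Int),
      (∀ p ∈ PySem.List.enumerate l i, p.1 ∉ impossibles →
        (rgbw tokens (p.2.toList.length + 1) p.2 PySem.Dict.empty).1 = countWays p.2 tokens) →
      (l.foldl (fun (st : Int × Int) dat =>
          ((if st.2 ∈ impossibles then st.1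
            else st.1 + (rgbw tokens (dat.toList.length + 1) dat PySem.Dict.empty).1), st.2 + 1))
        (acc, i)).1
      = (PySem.List.enumerate l i).foldl (fun total p =>
          if PySem.Set.contains (PySem.Set.ofList impossibles) p.1 then total
          else total + countWays p.2 tokens) acc := by
  intro l
  induction l with
  | nil => intro i acc _; simp [PySem.List.enumerate_nil]
  | cons d ds ih =>
    intro i acc hpt
    rw [PySem.List.enumerate_cons, List.foldl_cons, List.foldl_cons]
    have hmem : PySem.Set.contains (PySem.Set.ofList impossibles) i = true ↔ i ∈ impossibles := by
      rw [PySem.Set.contains_iff, PySem.Set.mem_ofList]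
    by_cases hi : i ∈ impossibles
    · rw [if_pos hi, if_pos (hmem.mpr hi)]
      exact ih (i+1) acc (fun p hp hnp => hpt p (List.mem_cons_of_mem _ hp) hnp)
    · rw [if_neg hi, if_neg (fun h => hi (hmem.mp h))]
      rw [hpt (i, d) (List.mem_cons_self ..) hi]
      exact ih (i+1) (acc + countWays d tokens)
        (fun p hp hnp => hpt p (List.mem_cons_of_mem _ hp) hnp)

-- ===== VERDICT (by name: the statement is the Claim_ definition above) =====
theorem part2_spec : Claim_equal_part2 := by
  intro data tokens impossibles _ hpre
  unfold Spec_part2 part2 part2_alt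
  rcases hpre with HT' | hall
  · have HT : ∀ t ∈ tokens, t ≠ "" := by intro t ht he; exact HT' (he ▸ ht)
    refine fold_eq tokens impossibles data 0 0 ?_
    intro p _ _
    rw [countWays_eq tokens HT p.2,
      (rgbw_correct tokens HT (p.2.toList.length + 1) p.2 PySem.Dict.empty (by omega)
        (by intro k v h; simp [PySem.Dict.get?_empty] at h)).1]
  · refine fold_eq tokens impossibles data 0 0 ?_
    intro p hp hnotin
    have hp2 : p.2 = "" := hall p hp hnotin
    rw [hp2, rgbw_empty, countWays_empty]
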